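-- pv_equiv track=rewrite | github.com/arator99/planningtool9 | backend/services/domein/balans_domein.py | tel_compensatie_codes
-- ===== SOURCE A (Python) =====
-- ZATERDAG_COMPENSATIE_CODES: frozenset[str] = frozenset({"CXW"})
--
-- ZONDAG_COMPENSATIE_CODES: frozenset[str] = frozenset({"RXW"})
--
-- FEESTDAG_COMPENSATIE_CODES: frozenset[str] = frozenset({"RXF"})
--
-- def tel_compensatie_codes(shift_codes: list[str | None]) -> tuple[int, int, int]:
--     """
--     Tel CXW, RXW en RXF codes in een lijst van shift_codes.
--
--     Returns:
--         (cxw_count, rxw_count, rxf_count)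
--     """
--     cxw = rxw = rxf = 0
--     for code in shift_codes:
--         if not code:
--             continue
--         upper = code.strip().upper()
--         if upper in ZATERDAG_COMPENSATIE_CODES:
--             cxw += 1
--         elif upper in ZONDAG_COMPENSATIE_CODES:
--             rxw += 1
--         elif upper in FEESTDAG_COMPENSATIE_CODES:
--             rxf += 1
--     return cxw, rxw, rxf
-- ===== SOURCE B (Python) =====
-- def tel_compensatie_codes(shift_codes):
--     normalized = [c.strip().upper() for c in shift_codes if c]
--     return normalized.count("CXW"), normalized.count("RXW"), normalized.count("RXF")
-- ===== Notes on version B (the rewrite author's own statement) =====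
-- stated objective: simpler
-- what changed: Replaces the per-element if/elif branch-counting loop with a normalize-then-query structure: build the list of normalized codes once, then answer each of the three counts by a keyed count query.
import Mathlib
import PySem

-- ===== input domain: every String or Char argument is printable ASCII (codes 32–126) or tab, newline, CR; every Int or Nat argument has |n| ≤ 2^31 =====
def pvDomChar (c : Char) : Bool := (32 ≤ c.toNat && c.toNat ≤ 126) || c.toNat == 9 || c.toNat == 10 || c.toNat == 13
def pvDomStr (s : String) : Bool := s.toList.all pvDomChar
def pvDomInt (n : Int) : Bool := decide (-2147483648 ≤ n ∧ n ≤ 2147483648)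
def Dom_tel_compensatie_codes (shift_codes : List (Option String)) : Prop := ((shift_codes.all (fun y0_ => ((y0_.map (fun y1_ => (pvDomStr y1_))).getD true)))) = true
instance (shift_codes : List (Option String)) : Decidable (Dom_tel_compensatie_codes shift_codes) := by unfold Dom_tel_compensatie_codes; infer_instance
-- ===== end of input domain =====

-- B builds the normalized-code list once and answers the three counts by keyed count queries (simpler decomposition, same cost).


-- ===== PORT A =====
-- literal transliteration of A's loop: skip falsy codes, normalize, if/elif branch-count
def tel_compensatie_codes (shift_codes : List (Option String)) : Int × Int × Int :=
  shift_codes.foldl (fun acc code =>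
    match code with
    | none => acc
    | some s =>
      if s = "" then acc
      else
        let upper := PySem.Str.upper (PySem.Str.strip s)
        if upper = "CXW" then (acc.1 + 1, acc.2.1, acc.2.2)
        else if upper = "RXW" then (acc.1, acc.2.1 + 1, acc.2.2)
        else if upper = "RXF" then (acc.1, acc.2.1, acc.2.2 + 1)
        else acc) (0, 0, 0)

-- ===== PORT B =====
-- B: build normalized list once, then three keyed count queries (no per-element branching)
def pvNormalized (shift_codes : List (Option String)) : List String :=
  shift_codes.filterMap (fun c =>
    match c with
    | none => none
    | some s => if s = "" then none else some (PySem.Str.upper (PySem.Str.strip s)))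

def tel_compensatie_codes_alt (shift_codes : List (Option String)) : Int × Int × Int :=
  let normalized := pvNormalized shift_codes
  ((normalized.count "CXW" : Int), (normalized.count "RXW" : Int), (normalized.count "RXF" : Int))

-- ===== PRECONDITION & SPEC =====
def Spec_tel_compensatie_codes (shift_codes : List (Option String)) (out : Int × Int × Int) : Prop := out = tel_compensatie_codes_alt shift_codes
instance (shift_codes : List (Option String)) (out : Int × Int × Int) : Decidable (Spec_tel_compensatie_codes shift_codes out) := by unfold Spec_tel_compensatie_codes; infer_instance

-- ===== CLAIM =====
def Claim_equal_tel_compensatie_codes : Prop := ∀ (shift_codes : List (Option String)), Dom_tel_compensatie_codes shift_codes → Spec_tel_compensatie_codes shift_codes (tel_compensatie_codes shift_codes)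

-- ===== LEMMAS AND PROOFS =====
theorem tel_loop_inv (xs : List (Option String)) (a b c : Int) :
    xs.foldl (fun acc code =>
      match code with
      | none => acc
      | some s =>
        if s = "" then acc
        else
          let upper := PySem.Str.upper (PySem.Str.strip s)
          if upper = "CXW" then (acc.1 + 1, acc.2.1, acc.2.2)
          else if upper = "RXW" then (acc.1, acc.2.1 + 1, acc.2.2)
          else if upper = "RXF" then (acc.1, acc.2.1, acc.2.2 + 1)
          else acc) (a, b, c)
    = (a + ((pvNormalized xs).count "CXW" : Int),
       b + ((pvNormalized xs).count "RXW" : Int),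
       c + ((pvNormalized xs).count "RXF" : Int)) := by
  induction xs generalizing a b c with
  | nil => simp [pvNormalized]
  | cons hd tl ih =>
    match hd with
    | none => simpa [pvNormalized, List.filterMap_cons] using ih a b c
    | some s =>
      by_cases hs : s = ""
      · simpa [pvNormalized, List.filterMap_cons, hs] using ih a b c
      · simp only [List.foldl_cons, pvNormalized, List.filterMap_cons, hs]
        set u := PySem.Str.upper (PySem.Str.strip s) with hu
        by_cases h1 : u = "CXW"
        · simp [h1, ih, pvNormalized]; omega
        · by_cases h2 : u = "RXW"
          · simp [h2, ih, pvNormalized]; omega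
          · by_cases h3 : u = "RXF"
            · simp [h3, ih, pvNormalized]; omega
            · simp [h1, h2, h3, ih, pvNormalized]

-- ===== VERDICT =====
theorem tel_compensatie_codes_spec : Claim_equal_tel_compensatie_codes := by
  intro shift_codes _
  unfold Spec_tel_compensatie_codes tel_compensatie_codes tel_compensatie_codes_alt
  simp [tel_loop_inv]
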